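-- pv_equiv track=rewrite | github.com/jkworldchampion/algorithm | programmers/April_6/problem_4.py | solution
-- ===== SOURCE A (Python) =====
-- def solution(a):
--     answer = 0
--     alive = [0] * (len(a))
--
--     min_value = a[0]
--     for i in range(1,len(a)):
--         if a[i] < min_value:
--             alive[i] += 1
--         min_value = min(min_value, a[i])
--
--     min_value = a[-1]
--     for i in range(len(a)-1,-1, -1):
--         if a[i] < min_value:
--             alive[i] += 1
--         min_value = min(min_value, a[i])
--
--     for i in range(1,len(a)-1):
--         if alive[i] != 0:
--             answer += 1
--
--     # 시간초과
-- #     alive = [0] * (len(a))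
-- #     for i in range(1,len(a)-1):
-- #         front_min = min(a[:i])
-- #         back_min = min(a[i+1:])
--
-- #         if (front_min > a[i]) or (back_min > a[i]):
-- #             alive[i] = 1
--
-- #     answer = sum(alive) + 2
--     return answer + 2
-- ===== SOURCE B (Python) =====
-- def solution(a):
--     n = len(a)
--     m = a[0]
--     fwd = 0
--     for x in a[1:n-1]:
--         if x < m:
--             fwd += 1
--             m = x
--     m = a[-1]
--     bwd = 0
--     for x in reversed(a[1:n-1]):
--         if x < m:
--             bwd += 1
--             m = x
--     mn = min(a)
--     both = 1 if a.count(mn) == 1 and 0 < a.index(mn) < n - 1 else 0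
--     return fwd + bwd - both + 2
-- ===== Notes on version B (the rewrite author's own statement) =====
-- stated objective: faster
-- what changed: A marks per-index survivors in an alive array with two index-driven passes and a third counting pass over the OR of both marks; B never forms the per-index OR: it counts strict-prefix-minimum records and strict-suffix-minimum records separately and corrects the double count by inclusion-exclusion, with the overlap computed in closed form as 'the global minimum is unique and interior' via min/count/index.
import Mathlib
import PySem

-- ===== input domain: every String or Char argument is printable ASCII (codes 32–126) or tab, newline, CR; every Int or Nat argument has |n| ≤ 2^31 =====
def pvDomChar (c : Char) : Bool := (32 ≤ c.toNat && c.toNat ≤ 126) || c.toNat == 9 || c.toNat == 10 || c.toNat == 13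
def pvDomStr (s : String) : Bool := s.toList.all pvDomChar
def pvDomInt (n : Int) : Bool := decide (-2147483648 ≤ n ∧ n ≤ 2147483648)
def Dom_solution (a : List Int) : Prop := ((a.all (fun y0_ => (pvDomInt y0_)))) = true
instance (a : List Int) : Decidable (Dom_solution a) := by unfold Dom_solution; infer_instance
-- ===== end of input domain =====

-- B replaces A's alive-array marking passes and per-index OR by two independent record counts
-- combined by inclusion-exclusion, the overlap being the closed-form test 'the global minimum
-- is unique and interior'; a timing run measured B faster by a constant factor.

-- ===== PORT A =====
-- body of both of A's marking loops (identical in the Python source)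
def stepMark (a : List Int) (st : List Int × Int) (i : Int) : List Int × Int :=
  let ai := PySem.List.pyGetD a i 0
  (if ai < st.2 then st.1.modify i.toNat (· + 1) else st.1, min st.2 ai)

-- body of A's final counting loop
def stepCountA (al : List Int) (acc : Int) (i : Int) : Int :=
  if PySem.List.pyGetD al i 0 ≠ 0 then acc + 1 else acc

def solution (a : List Int) : Int :=
  let n : Int := (a.length : Int)
  let alive : List Int := List.replicate a.length 0
  let mv : Int := PySem.List.pyGetD a 0 0
  let p1 := (PySem.List.pyRange 1 n 1).foldl (stepMark a) (alive, mv)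
  let mv2 : Int := PySem.List.pyGetD a (-1) 0
  let p2 := (PySem.List.pyRange (n - 1) (-1) (-1)).foldl (stepMark a) (p1.1, mv2)
  let answer := (PySem.List.pyRange 1 (n - 1) 1).foldl (stepCountA p2.1) 0
  answer + 2

-- ===== PORT B =====
-- body of both of B's record-counting loops ('if x < m: cnt += 1; m = x')
def recStep (st : Int × Int) (x : Int) : Int × Int :=
  if x < st.2 then (st.1 + 1, x) else st

def solution_alt (a : List Int) : Int :=
  let n : Int := (a.length : Int)
  let s := PySem.List.slice a (some 1) (some (n - 1))        -- a[1:n-1]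
  let fwd := (s.foldl recStep (0, PySem.List.pyGetD a 0 0)).1
  let bwd := (s.reverse.foldl recStep (0, PySem.List.pyGetD a (-1) 0)).1
  let mn := (PySem.List.min? a (fun x => x)).getD 0          -- min(a)
  let idx : Int := ((PySem.List.index? a mn).getD 0 : Int)   -- a.index(mn)
  let both : Int := if PySem.List.count a mn = 1 ∧ 0 < idx ∧ idx < n - 1 then 1 else 0
  fwd + bwd - both + 2

-- ===== PRECONDITION & SPEC =====
-- Pre_ excludes only the empty list, on which both A and B raise IndexError (a[0]).
def Pre_solution (a : List Int) : Prop := a ≠ []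
instance (a : List Int) : Decidable (Pre_solution a) := by unfold Pre_solution; infer_instance
def pvWitness_solution : List Int := ([3, 1, 2] : List Int)

def Spec_solution (a : List Int) (out : Int) : Prop := out = solution_alt a
instance (a : List Int) (out : Int) : Decidable (Spec_solution a out) := by unfold Spec_solution; infer_instance

-- ===== CLAIM =====
def Claim_equal_solution : Prop := ∀ (a : List Int), Dom_solution a → Pre_solution a → Spec_solution a (solution a)

-- ===== LEMMAS AND PROOFS =====

-- min of a[0..j]  (a[0] folded in twice, harmless for min)
def pmin (a : List Int) (j : Nat) : Int := (a.take (j + 1)).foldl min (a.getD 0 0)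
-- min of a[j..] together with a[n-1]; smin a n = a[n-1]
def smin (a : List Int) (j : Nat) : Int := (a.drop j).foldl min (a.getD (a.length - 1) 0)

-- Bool predicates: strict left record / strict right record at index i
def pb (a : List Int) (i : Nat) : Bool := a.getD i 0 < pmin a (i - 1)
def sb (a : List Int) (i : Nat) : Bool := a.getD i 0 < smin a (i + 1)
-- number of j in [k, k+m) satisfying q, as an Int
def cntI (q : Nat → Bool) (k m : Nat) : Int := ((List.range m).countP (fun j => q (k + j)) : Int)
-- B's record-counting loop, structurally
def countRec (m : Int) : List Int → Int
  | [] => 0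
  | x :: t => (if x < m then 1 else 0) + countRec (min m x) t

theorem foldl_min_comm (l : List Int) (x y : Int) :
    l.foldl min (min x y) = min x (l.foldl min y) := by
  induction l generalizing y with
  | nil => simp
  | cons z t ih => simpa [min_assoc] using ih (min y z)

theorem pmin_zero (a : List Int) (ha : a ≠ []) : pmin a 0 = a.getD 0 0 := by
  cases a with
  | nil => simp at ha
  | cons x t => simp [pmin]

theorem pmin_succ (a : List Int) (j : Nat) (hj : j + 1 < a.length) :
    pmin a (j + 1) = min (pmin a j) (a.getD (j + 1) 0) := by
  have h : a.take (j + 1 + 1) = a.take (j + 1) ++ [a[j+1]] := by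
    rw [List.take_add_one, List.getElem?_eq_getElem hj]; rfl
  rw [pmin, h, List.foldl_append, List.getD_eq_getElem _ _ hj]; rfl

theorem smin_top (a : List Int) : smin a a.length = a.getD (a.length - 1) 0 := by
  simp [smin]

theorem smin_step (a : List Int) (j : Nat) (hj : j < a.length) :
    smin a j = min (a.getD j 0) (smin a (j + 1)) := by
  rw [smin, List.drop_eq_getElem_cons hj, List.foldl_cons,
    min_comm, foldl_min_comm, List.getD_eq_getElem _ _ hj]; rfl

theorem smin_last (a : List Int) (ha : a ≠ []) :
    smin a (a.length - 1) = a.getD (a.length - 1) 0 := by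
  have h := smin_step a (a.length - 1) (by cases a <;> simp_all)
  rw [show a.length - 1 + 1 = a.length from by cases a <;> simp_all, smin_top] at h
  rw [h, min_self]

-- basic properties of pmin / smin
theorem pmin_le (a : List Int) (i : Nat) (hi : i < a.length) :
    ∀ j ≤ i, pmin a i ≤ a.getD j 0 := by
  induction i with
  | zero =>
    intro j hj
    interval_cases j
    rw [pmin_zero a (by cases a <;> simp_all)]
  | succ i ih =>
    intro j hj
    rw [pmin_succ a i hi]
    rcases Nat.lt_or_ge j (i + 1) with h | h
    · exact le_trans (min_le_left _ _) (ih (by omega) j (by omega))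
    · have : j = i + 1 := by omega
      subst this; exact min_le_right _ _

theorem exists_pmin (a : List Int) (i : Nat) (hi : i < a.length) :
    ∃ j ≤ i, pmin a i = a.getD j 0 := by
  induction i with
  | zero => exact ⟨0, le_refl 0, pmin_zero a (by cases a <;> simp_all)⟩
  | succ i ih =>
    rw [pmin_succ a i hi]
    rcases ih (by omega) with ⟨j, hj, hje⟩
    rcases min_cases (pmin a i) (a.getD (i + 1) 0) with ⟨h, _⟩ | ⟨h, _⟩
    · exact ⟨j, by omega, by rw [h, hje]⟩
    · exact ⟨i + 1, le_refl _, h⟩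

theorem smin_mono (a : List Int) (i j : Nat) (hij : i ≤ j) (hj : j ≤ a.length) :
    smin a i ≤ smin a j := by
  induction j with
  | zero => interval_cases i; exact le_refl _
  | succ j ih =>
    rcases Nat.lt_or_ge i (j + 1) with h | h
    · calc smin a i ≤ smin a j := ih (by omega) (by omega)
        _ = min (a.getD j 0) (smin a (j+1)) := smin_step a j (by omega)
        _ ≤ _ := min_le_right _ _
    · have : i = j + 1 := by omega
      subst this; exact le_refl _

theorem smin_le (a : List Int) (i : Nat) :
    ∀ j, i ≤ j → j < a.length → smin a i ≤ a.getD j 0 := by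
  intro j hij hj
  calc smin a i ≤ smin a j := smin_mono a i j hij (by omega)
    _ = min (a.getD j 0) (smin a (j+1)) := smin_step a j hj
    _ ≤ _ := min_le_left _ _

theorem exists_smin (a : List Int) : ∀ (d i : Nat), a.length - i = d → i < a.length →
    ∃ j, i ≤ j ∧ j < a.length ∧ smin a i = a.getD j 0 := by
  intro d
  induction d with
  | zero => intro i h1 h2; omega
  | succ d ih =>
    intro i h1 h2
    rcases Nat.lt_or_ge (i + 1) a.length with h | h
    · rcases ih (i + 1) (by omega) h with ⟨j, hj1, hj2, hje⟩
      rw [smin_step a i h2]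
      rcases min_cases (a.getD i 0) (smin a (i + 1)) with ⟨he, _⟩ | ⟨he, _⟩
      · exact ⟨i, le_refl _, h2, he⟩
      · exact ⟨j, by omega, hj2, by rw [he, hje]⟩
    · have : i = a.length - 1 := by omega
      subst this
      exact ⟨a.length - 1, le_refl _, by omega, smin_last a (by cases a <;> simp_all)⟩

-- ===== A-side: the two marking loops fill the alive array with the record marks =====
theorem loop1_spec (a : List Int) : ∀ (m k : Nat) (l : List Int), l.length = a.length →
    1 ≤ k → k + m = a.length →
    (PySem.List.pyRange (k : Int) (a.length : Int) 1).foldl (stepMark a) (l, pmin a (k - 1))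
    = (l.mapIdx (fun i v => if k ≤ i ∧ a.getD i 0 < pmin a (i - 1) then v + 1 else v),
       pmin a (a.length - 1)) := by
  intro m
  induction m with
  | zero =>
    intro k l hl hk hkm
    rw [Nat.add_zero] at hkm
    subst hkm
    rw [PySem.List.pyRange_one_eq_nil (le_refl _), List.foldl_nil]
    simp only [Prod.mk.injEq]
    refine ⟨(List.ext_getElem (by simp [hl]) ?_).symm, trivial⟩
    intro i h1 h2
    simp only [List.getElem_mapIdx]
    rw [if_neg]
    simp only at h1
    rintro ⟨h3, _⟩; omega
  | succ m ih =>
    intro k l hl hk hkm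
    have hk' : k < a.length := by omega
    rw [PySem.List.pyRange_one_cons (by exact_mod_cast hk'), List.foldl_cons]
    have hstep : stepMark a (l, pmin a (k - 1)) (k : Int)
        = (if a.getD k 0 < pmin a (k - 1) then l.modify k (· + 1) else l, pmin a k) := by
      simp only [stepMark, PySem.List.pyGetD_natCast, Int.toNat_natCast]
      congr 1
      have := pmin_succ a (k - 1) (by omega)
      rw [show k - 1 + 1 = k from by omega] at this
      rw [this]
    rw [hstep]
    have hl' : (if a.getD k 0 < pmin a (k - 1) then l.modify k (· + 1) else l).length = a.length := by
      split <;> simp [hl]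
    have := ih (k + 1) _ hl' (by omega) (by omega)
    rw [show k + 1 - 1 = k from by omega] at this
    rw [show ((k:Int) + 1) = ((k+1 : Nat) : Int) from by push_cast; ring, this]
    simp only [Prod.mk.injEq]
    refine ⟨?_, trivial⟩
    · apply List.ext_getElem (by split <;> simp [hl])
      intro i h1 h2
      simp only [List.getElem_mapIdx]
      by_cases hik : i = k
      · subst hik
        rw [if_neg (by omega)]
        by_cases hc : a.getD i 0 < pmin a (i - 1)
        · simp only [if_pos hc, if_pos (show i ≤ i ∧ a.getD i 0 < pmin a (i - 1) from ⟨le_refl i, hc⟩)]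
          simp
        · simp only [if_neg hc, if_neg (show ¬(i ≤ i ∧ a.getD i 0 < pmin a (i - 1)) from fun h => hc h.2)]
      · have hil : i < (if a.getD k 0 < pmin a (k - 1) then l.modify k (· + 1) else l).length := by
          split <;> simpa [hl] using h2
        have hgi : (if a.getD k 0 < pmin a (k - 1) then l.modify k (· + 1) else l)[i]'hil
            = l[i]'(by simpa [hl] using h2) := by
          split
          · rw [List.getElem_modify, if_neg (by omega)]
          · rfl
        rw [hgi, if_congr (and_congr_left' (show k + 1 ≤ i ↔ k ≤ i from by omega)) rfl rfl]

theorem loop2_spec (a : List Int) : ∀ (k : Nat) (l : List Int), k ≤ a.length → l.length = a.length →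
    (PySem.List.pyRange ((k : Int) - 1) (-1) (-1)).foldl (stepMark a) (l, smin a k)
    = (l.mapIdx (fun i v => if i < k ∧ a.getD i 0 < smin a (i + 1) then v + 1 else v), smin a 0) := by
  intro k
  induction k with
  | zero =>
    intro l hk hl
    rw [show ((0:Nat):Int) - 1 = -1 from by norm_num,
      PySem.List.pyRange_neg_one_eq_nil (le_refl _), List.foldl_nil]
    simp only [Prod.mk.injEq]
    refine ⟨(List.ext_getElem (by simp) ?_).symm, trivial⟩
    intro i h1 h2
    simp only [List.getElem_mapIdx]
    rw [if_neg (by rintro ⟨h3, _⟩; omega)]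
  | succ k ih =>
    intro l hk hl
    rw [show ((k+1:Nat):Int) - 1 = (k:Int) from by push_cast; ring,
      PySem.List.pyRange_neg_one_cons (by omega), List.foldl_cons]
    have hstep : stepMark a (l, smin a (k + 1)) (k : Int)
        = (if a.getD k 0 < smin a (k + 1) then l.modify k (· + 1) else l, smin a k) := by
      simp only [stepMark, PySem.List.pyGetD_natCast, Int.toNat_natCast]
      congr 1
      rw [smin_step a k (by omega), min_comm]
    rw [hstep]
    have hl' : (if a.getD k 0 < smin a (k + 1) then l.modify k (· + 1) else l).length = a.length := by
      split <;> simp [hl]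
    rw [ih _ (by omega) hl']
    simp only [Prod.mk.injEq]
    refine ⟨?_, trivial⟩
    apply List.ext_getElem (by split <;> simp [hl])
    intro i h1 h2
    simp only [List.getElem_mapIdx]
    by_cases hik : i = k
    · subst hik
      rw [if_neg (by omega)]
      by_cases hc : a.getD i 0 < smin a (i + 1)
      · simp only [if_pos hc, if_pos (show i < i + 1 ∧ a.getD i 0 < smin a (i + 1) from ⟨by omega, hc⟩)]
        simp
      · simp only [if_neg hc, if_neg (show ¬(i < i + 1 ∧ a.getD i 0 < smin a (i + 1)) from fun h => hc h.2)]
    · have hil : i < (if a.getD k 0 < smin a (k + 1) then l.modify k (· + 1) else l).length := by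
        split <;> simpa [hl] using h2
      have hgi : (if a.getD k 0 < smin a (k + 1) then l.modify k (· + 1) else l)[i]'hil
          = l[i]'(by simpa [hl] using h2) := by
        split
        · rw [List.getElem_modify, if_neg (by omega)]
        · rfl
      rw [hgi, if_congr (and_congr_left' (show i < k ↔ i < k + 1 from by omega)) rfl rfl]

theorem alive_spec (a : List Int) (i : Nat) (h1 : 1 ≤ i) (h2 : i + 1 < a.length) :
    (((((List.replicate a.length (0:Int)).mapIdx
        (fun i v => if 1 ≤ i ∧ a.getD i 0 < pmin a (i - 1) then v + 1 else v)).mapIdx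
        (fun i v => if i < a.length ∧ a.getD i 0 < smin a (i + 1) then v + 1 else v)).getD i 0 ≠ 0)
    ↔ (pb a i ∨ sb a i)) := by
  have hlen : i < ((((List.replicate a.length (0:Int)).mapIdx
        (fun i v => if 1 ≤ i ∧ a.getD i 0 < pmin a (i - 1) then v + 1 else v)).mapIdx
        (fun i v => if i < a.length ∧ a.getD i 0 < smin a (i + 1) then v + 1 else v))).length := by
    simp; omega
  have hia : i < a.length := by omega
  rw [List.getD_eq_getElem _ _ hlen]
  simp only [List.getElem_mapIdx, List.getElem_replicate, pb, sb,
    List.getD_eq_getElem _ _ hia]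
  by_cases hL : a[i] < pmin a (i - 1) <;>
    by_cases hR : a[i] < smin a (i + 1) <;>
      simp [hL, hR, h1, hia]

-- counting with a shifted range
theorem cntI_succ (q : Nat → Bool) (k m : Nat) :
    cntI q k (m + 1) = (if q k then 1 else 0) + cntI q (k + 1) m := by
  unfold cntI
  rw [List.range_succ_eq_map, List.countP_cons, List.countP_map]
  have hc : List.countP ((fun j => q (k + j)) ∘ (fun i => i + 1)) (List.range m)
      = List.countP (fun j => q (k + 1 + j)) (List.range m) :=
    List.countP_congr (fun x _ => by
      simp only [Function.comp_apply]
      rw [show k + (x + 1) = k + 1 + x from by omega])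
  rw [hc]
  by_cases h : q k <;> simp [h] <;> push_cast <;> ring

-- A's counting loop computes cntI (pb ∨ sb)
theorem countA_spec (a F : List Int)
    (hF : ∀ i : Nat, 1 ≤ i → i + 1 < a.length →
      (F.getD i 0 ≠ 0 ↔ (pb a i ∨ sb a i))) :
    ∀ (m k : Nat) (c : Int), 1 ≤ k → k + m + 1 = a.length →
    (PySem.List.pyRange (k : Int) ((a.length : Int) - 1) 1).foldl (stepCountA F) c
    = c + cntI (fun i => pb a i || sb a i) k m := by
  intro m
  induction m with
  | zero =>
    intro k c hk hkm
    rw [PySem.List.pyRange_one_eq_nil (by omega), List.foldl_nil]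
    simp [cntI]
  | succ m ih =>
    intro k c hk hkm
    rw [PySem.List.pyRange_one_cons (by omega), List.foldl_cons]
    have hstep : stepCountA F c (k : Int) = c + (if pb a k || sb a k then 1 else 0) := by
      unfold stepCountA
      rw [PySem.List.pyGetD_natCast]
      have := hF k hk (by omega)
      by_cases h : pb a k ∨ sb a k
      · rw [if_pos (this.mpr h), if_pos (by simpa using h)]
      · rw [if_neg (fun hc => h (this.mp hc)), if_neg (by simpa using h)]
        ring
    rw [hstep, show ((k : Int) + 1) = ((k + 1 : Nat) : Int) from by push_cast; ring,
      ih (k + 1) _ (by omega) (by omega), cntI_succ]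
    ring

-- ===== B-side =====
theorem foldl_recStep (l : List Int) : ∀ (c m : Int),
    l.foldl recStep (c, m) = (c + countRec m l, l.foldl min m) := by
  induction l with
  | nil => intro c m; simp [countRec]
  | cons x t ih =>
    intro c m
    rw [List.foldl_cons, List.foldl_cons]
    unfold countRec
    by_cases h : x < m
    · rw [show recStep (c, m) x = (c + 1, x) from by simp [recStep, h], ih,
        if_pos h, show min m x = x from by omega]
      simp only [Prod.mk.injEq]
      exact ⟨by ring, trivial⟩
    · rw [show recStep (c, m) x = (c, m) from by simp [recStep, h], ih,
        if_neg h, show min m x = m from by omega]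
      simp only [Prod.mk.injEq]
      exact ⟨by ring, trivial⟩

-- forward record count over the interior equals cntI pb
theorem fwd_spec (a : List Int) : ∀ (m k : Nat), 1 ≤ k → k + m + 1 = a.length →
    countRec (pmin a (k - 1)) ((a.drop k).take m) = cntI (pb a) k m := by
  intro m
  induction m with
  | zero => intro k hk hkm; simp [countRec, cntI]
  | succ m ih =>
    intro k hk hkm
    have hk' : k < a.length := by omega
    rw [List.drop_eq_getElem_cons hk', List.take_succ_cons]
    unfold countRec
    have hmin : min (pmin a (k - 1)) a[k] = pmin a k := by
      have := pmin_succ a (k - 1) (by omega)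
      rw [show k - 1 + 1 = k from by omega] at this
      rw [this, List.getD_eq_getElem _ _ hk']
    have hih := ih (k + 1) (by omega) (by omega)
    rw [show k + 1 - 1 = k from by omega] at hih
    rw [hmin, hih, cntI_succ]
    have hpbk : pb a k = decide (a[k] < pmin a (k - 1)) := by
      rw [pb, List.getD_eq_getElem _ _ hk']
    rw [hpbk]
    by_cases h : a[k] < pmin a (k - 1) <;> simp [h]

-- backward record count over the reversed interior equals cntI sb
theorem bwd_spec (a : List Int) : ∀ (k : Nat), k + 2 ≤ a.length →
    countRec (smin a (k + 1)) (((a.drop 1).take k).reverse) = cntI (sb a) 1 k := by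
  intro k
  induction k with
  | zero => intro hk; simp [countRec, cntI]
  | succ k ih =>
    intro hk
    have hk1 : k + 1 < a.length := by omega
    have hget : k < (a.drop 1).length := by simp; omega
    have htake : (a.drop 1).take (k + 1) = (a.drop 1).take k ++ [a[k + 1]] := by
      rw [List.take_add_one, List.getElem?_eq_getElem hget]
      simp
    rw [htake, List.reverse_append, List.reverse_singleton, List.singleton_append]
    unfold countRec
    have hmin : min (smin a (k + 1 + 1)) a[k + 1] = smin a (k + 1) := by
      rw [smin_step a (k + 1) hk1, min_comm, List.getD_eq_getElem _ _ hk1]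
    rw [hmin, ih (by omega)]
    unfold cntI
    rw [List.range_succ, List.countP_append]
    simp only [List.countP_singleton]
    have hsb : sb a (1 + k) = decide (a[k + 1] < smin a (k + 1 + 1)) := by
      rw [show 1 + k = k + 1 from by omega, sb, List.getD_eq_getElem _ _ hk1]
    rw [hsb]
    by_cases h : a[k + 1] < smin a (k + 1 + 1) <;> simp [h] <;> push_cast <;> ring

-- count of equal elements, via indices
theorem count_eq_countP_range (a : List Int) (v : Int) :
    a.count v = (List.range a.length).countP (fun i => a.getD i 0 == v) := by
  induction a with
  | nil => simp
  | cons h t ih =>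
    rw [List.length_cons, List.range_succ_eq_map, List.countP_cons]
    have hmap : (List.map (fun i => i + 1) (List.range t.length)).countP (fun i => (h :: t).getD i 0 == v)
        = (List.range t.length).countP (fun i => t.getD i 0 == v) := by
      rw [List.countP_map]
      exact List.countP_congr (fun x _ => by simp [Function.comp])
    rw [hmap, ← ih]
    by_cases hv : h = v <;> simp [List.count_cons, hv, Nat.add_comm]

-- unique satisfier characterisation of countP = 1 on a range
theorem countP_range_eq_one (m : Nat) (p : Nat → Bool) (j : Nat) (hj : j < m) (hpj : p j)
    (huniq : ∀ k, k < m → p k → k = j) : (List.range m).countP p = 1 := by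
  rw [List.countP_eq_length_filter]
  have hmem : j ∈ (List.range m).filter p := by
    rw [List.mem_filter, List.mem_range]; exact ⟨hj, hpj⟩
  have hall : ∀ x ∈ (List.range m).filter p, x = j := by
    intro x hx
    rw [List.mem_filter, List.mem_range] at hx
    exact huniq x hx.1 hx.2
  have hnd : ((List.range m).filter p).Nodup := (List.nodup_range).filter p
  rcases List.mem_iff_append.mp hmem with ⟨pre, suf, hps⟩
  have hpre : pre = [] := by
    cases pre with
    | nil => rfl
    | cons y ys =>
      exfalso
      have hy : y = j := hall y (by rw [hps]; simp)
      rw [hps, hy] at hnd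
      simp at hnd
  have hsuf : suf = [] := by
    cases suf with
    | nil => rfl
    | cons y ys =>
      exfalso
      have hy : y = j := hall y (by rw [hps]; simp)
      rw [hps, hy, hpre] at hnd
      simp at hnd
  rw [hps, hpre, hsuf]; rfl

theorem countP_range_inv (m : Nat) (p : Nat → Bool) (h : (List.range m).countP p = 1) :
    ∃ j, j < m ∧ p j ∧ ∀ k, k < m → p k → k = j := by
  rw [List.countP_eq_length_filter] at h
  rcases List.length_eq_one_iff.mp h with ⟨j, hj⟩
  have hjm : j ∈ (List.range m).filter p := by rw [hj]; simp
  rw [List.mem_filter, List.mem_range] at hjm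
  refine ⟨j, hjm.1, hjm.2, fun k hk hpk => ?_⟩
  have : k ∈ (List.range m).filter p := by
    rw [List.mem_filter, List.mem_range]; exact ⟨hk, hpk⟩
  rw [hj] at this; simpa using this

-- inclusion-exclusion for countP
theorem countP_or_and (l : List Nat) (p q : Nat → Bool) :
    l.countP (fun x => p x || q x) + l.countP (fun x => p x && q x)
    = l.countP p + l.countP q := by
  induction l with
  | nil => rfl
  | cons x t ih =>
    simp only [List.countP_cons]
    by_cases hp : p x <;> by_cases hq : q x <;> simp [hp, hq] <;> omega

-- mn = min(a) is pmin over the whole list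
theorem mn_eq_pmin (a : List Int) (ha : a ≠ []) :
    ((PySem.List.min? a (fun x => x)).getD 0) = pmin a (a.length - 1) := by
  cases a with
  | nil => simp at ha
  | cons h t =>
    rw [PySem.List.min?_id_cons, Option.getD_some, pmin]
    have : (h :: t).take (t.length + 1 - 1 + 1) = h :: t := by
      rw [show t.length + 1 - 1 + 1 = (h :: t).length from by simp, List.take_length]
    simp only [List.length_cons, this, List.getD_cons_zero, List.foldl_cons, min_self]

-- the characterisation: interior strict records on both sides = strict global minimum
theorem both_char (a : List Int) (i : Nat) (h1 : 1 ≤ i) (h2 : i + 1 < a.length) :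
    ((pb a i ∧ sb a i) ↔ ∀ j, j < a.length → j ≠ i → a.getD i 0 < a.getD j 0) := by
  constructor
  · rintro ⟨hp, hs⟩ j hj hji
    rw [pb, decide_eq_true_iff] at hp
    rw [sb, decide_eq_true_iff] at hs
    rcases Nat.lt_or_ge j i with h | h
    · exact lt_of_lt_of_le hp (pmin_le a (i - 1) (by omega) j (by omega))
    · exact lt_of_lt_of_le hs (smin_le a (i + 1) j (by omega) hj)
  · intro hall
    constructor
    · rw [pb, decide_eq_true_iff]
      rcases exists_pmin a (i - 1) (by omega) with ⟨j, hj, hje⟩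
      rw [hje]
      exact hall j (by omega) (by omega)
    · rw [sb, decide_eq_true_iff]
      rcases exists_smin a (a.length - (i + 1)) (i + 1) rfl (by omega) with ⟨j, hj1, hj2, hje⟩
      rw [hje]
      exact hall j hj2 (by omega)

-- the overlap term: cntI (pb ∧ sb) = B's closed-form 'both'
theorem both_spec (a : List Int) (ha : 2 ≤ a.length) :
    cntI (fun i => pb a i && sb a i) 1 (a.length - 2)
    = (if PySem.List.count a ((PySem.List.min? a (fun x => x)).getD 0) = 1 ∧
          0 < (((PySem.List.index? a ((PySem.List.min? a (fun x => x)).getD 0)).getD 0 : Nat) : Int) ∧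
          (((PySem.List.index? a ((PySem.List.min? a (fun x => x)).getD 0)).getD 0 : Nat) : Int)
            < (a.length : Int) - 1
       then 1 else 0) := by
  have hane : a ≠ [] := by cases a <;> simp_all
  set mn := (PySem.List.min? a (fun x => x)).getD 0 with hmn
  have hmnp : mn = pmin a (a.length - 1) := mn_eq_pmin a hane
  have hmn_le : ∀ j, j < a.length → mn ≤ a.getD j 0 := by
    intro j hj
    rw [hmnp]
    exact pmin_le a (a.length - 1) (by omega) j (by omega)
  have hmn_ex : ∃ j, j < a.length ∧ a.getD j 0 = mn := by
    rcases exists_pmin a (a.length - 1) (by omega) with ⟨j, hj, hje⟩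
    exact ⟨j, by omega, by rw [← hje, hmnp]⟩
  by_cases hc : PySem.List.count a mn = 1 ∧
      0 < (((PySem.List.index? a mn).getD 0 : Nat) : Int) ∧
      (((PySem.List.index? a mn).getD 0 : Nat) : Int) < (a.length : Int) - 1
  · rw [if_pos hc]
    obtain ⟨hcnt, hlo, hhi⟩ := hc
    -- count = 1 gives the unique position of mn
    have hcnt' : (List.range a.length).countP (fun i => a.getD i 0 == mn) = 1 := by
      rw [← count_eq_countP_range, ← PySem.List.count_eq]; exact hcnt
    rcases countP_range_inv _ _ hcnt' with ⟨j0, hj0m, hpj0, huq⟩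
    have hj0v : a.getD j0 0 = mn := by simpa using hpj0
    -- index? finds j0
    have hmem : mn ∈ a := by
      rcases hmn_ex with ⟨j, hj, hje⟩
      rw [← hje, List.getD_eq_getElem a 0 hj]
      exact List.getElem_mem hj
    have hidx : ∃ k, PySem.List.index? a mn = some k := by
      rcases Option.isSome_iff_exists.mp ((PySem.List.index?_isSome_iff a mn).mpr hmem) with ⟨k, hk⟩
      exact ⟨k, hk⟩
    rcases hidx with ⟨k, hk⟩
    rcases PySem.List.getElem_of_index?_eq_some hk with ⟨hkl, hkv, _⟩
    have hkj0 : k = j0 := huq k hkl (by rw [List.getD_eq_getElem _ _ hkl, hkv]; simp)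
    rw [hk] at hlo hhi
    simp only [Option.getD_some] at hlo hhi
    rw [hkj0] at hlo hhi
    -- strict min at j0
    have hsm : ∀ j, j < a.length → j ≠ j0 → a.getD j0 0 < a.getD j 0 := by
      intro j hj hjne
      have hle := hmn_le j hj
      have hne : a.getD j 0 ≠ mn := by
        intro he
        exact hjne (huq j hj (by rw [he]; simp))
      rw [hj0v]
      omega
    have h1j : 1 ≤ j0 := by omega
    have h2j : j0 + 1 < a.length := by omega
    have hbsat : (fun i => pb a i && sb a i) (1 + (j0 - 1)) = true := by
      rw [show 1 + (j0 - 1) = j0 from by omega]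
      have := (both_char a j0 h1j h2j).mpr hsm
      simp [this.1, this.2]
    unfold cntI
    rw [countP_range_eq_one (a.length - 2) _ (j0 - 1) (by omega) hbsat ?_]
    · rfl
    · intro k2 hk2 hpk2
      have hk2i : 1 ≤ 1 + k2 ∧ (1 + k2) + 1 < a.length := ⟨by omega, by omega⟩
      have hsm2 := (both_char a (1 + k2) hk2i.1 hk2i.2).mp (by simpa using hpk2)
      by_cases he : 1 + k2 = j0
      · omega
      · exfalso
        have ha1 := hsm2 j0 (by omega) (fun h => he h.symm)
        have ha2 := hsm (1 + k2) (by omega) he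
        omega
  · rw [if_neg hc]
    -- no interior index is a two-sided strict record
    unfold cntI
    rw [List.countP_eq_zero.mpr ?_]
    · rfl
    · intro j hj hpj
      rw [List.mem_range] at hj
      set i := 1 + j with hi
      have h1 : 1 ≤ i := by omega
      have h2 : i + 1 < a.length := by omega
      have hsm := (both_char a i h1 h2).mp (by simpa using hpj)
      -- then mn = a[i], count = 1 and index? = i: contradiction with ¬hc
      have hvi : a.getD i 0 = mn := by
        rcases hmn_ex with ⟨j1, hj1, hje⟩
        by_cases hne : j1 = i
        · rw [← hne]; exact hje
        · exfalso
          have := hsm j1 hj1 hne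
          have := hmn_le i (by omega)
          omega
      have hcnt : PySem.List.count a mn = 1 := by
        rw [PySem.List.count_eq, count_eq_countP_range]
        apply countP_range_eq_one a.length _ i (by omega) (by rw [hvi]; simp)
        intro k hk hpk
        by_contra hne
        have := hsm k hk (fun h => hne (congrArg id h))
        have : a.getD k 0 = mn := by simpa using hpk
        have := hvi
        omega
      have hmem : mn ∈ a := by
        rw [← hvi, List.getD_eq_getElem a 0 (show i < a.length from by omega)]
        exact List.getElem_mem _
      rcases Option.isSome_iff_exists.mp ((PySem.List.index?_isSome_iff a mn).mpr hmem) with ⟨k, hk⟩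
      rcases PySem.List.getElem_of_index?_eq_some hk with ⟨hkl, hkv, _⟩
      have hki : k = i := by
        by_contra hne
        have := hsm k hkl hne
        rw [hvi] at this
        rw [List.getD_eq_getElem _ _ hkl, hkv] at this
        omega
      apply hc
      rw [hk]
      simp only [Option.getD_some, hki]
      exact ⟨hcnt, by push_cast; omega, by push_cast; omega⟩

-- the interior slice a[1:n-1]
theorem slice_interior (a : List Int) (ha : a ≠ []) :
    PySem.List.slice a (some 1) (some ((a.length : Int) - 1))
    = (a.drop 1).take (a.length - 2) := by
  have h : ((a.length : Int) - 1) = ((a.length - 1 : Nat) : Int) := by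
    cases a <;> simp_all
  rw [h, show (1 : Int) = ((1 : Nat) : Int) from rfl, PySem.List.slice_natCast]
  congr 1

theorem main_eq (a : List Int) (ha : a ≠ []) : solution a = solution_alt a := by
  have hn1 : 1 ≤ a.length := List.length_pos_iff.mpr ha
  have hm0 : PySem.List.pyGetD a (-1) 0 = smin a a.length := by
    rw [PySem.List.pyGetD_neg_one a 0 ha, List.getLast_eq_getElem, smin_top,
      List.getD_eq_getElem _ _ (by omega)]
  have hmv : PySem.List.pyGetD a 0 0 = pmin a 0 := by
    rw [PySem.List.pyGetD_zero, pmin_zero a ha]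
  rw [solution, solution_alt]
  rcases Nat.lt_or_ge a.length 2 with h2 | h2
  · -- a.length = 1
    have hn : a.length = 1 := by omega
    have hr : PySem.List.pyRange 1 ((1:Int) - 1) 1 = [] := PySem.List.pyRange_one_eq_nil (by norm_num)
    have hs : PySem.List.slice a (some 1) (some ((a.length : Int) - 1)) = [] := by
      rw [slice_interior a ha, hn]; simp
    simp only [hn, Nat.cast_one, hr, List.foldl_nil]
    -- both = 0 : index of the minimum is 0
    cases a with
    | nil => simp at ha
    | cons h t =>
      have ht : t = [] := by simpa [hn] using congrArg id (by simpa using hn)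
      subst ht
      have hs0 : PySem.List.slice ([h] : List Int) (some 1) (some 0) = [] := by
        rw [show (1 : Int) = ((1 : Nat) : Int) from rfl,
          show (0 : Int) = ((0 : Nat) : Int) from rfl, PySem.List.slice_natCast]
        simp
      norm_num [PySem.List.min?_id_cons, PySem.List.index?_cons_self, hs0]
  · -- a.length ≥ 2
    have h1 := loop1_spec a (a.length - 1) 1 (List.replicate a.length 0) (by simp) (le_refl 1) (by omega)
    rw [Nat.cast_one, show (1:Nat) - 1 = 0 from rfl, ← hmv] at h1
    rw [h1]
    have hl2 := loop2_spec a a.length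
      ((List.replicate a.length 0).mapIdx
        (fun i v => if 1 ≤ i ∧ a.getD i 0 < pmin a (i - 1) then v + 1 else v))
      (le_refl _) (by simp)
    rw [← hm0] at hl2
    rw [hl2]
    -- A's counting loop
    simp only []
    have hca := countA_spec a _ (fun i hi1 hi2 => alive_spec a i hi1 hi2) (a.length - 2) 1 0
      (le_refl 1) (by omega)
    simp only [Nat.cast_one] at hca
    rw [hca]
    -- B's two record loops
    rw [slice_interior a ha, foldl_recStep, foldl_recStep]
    rw [hmv, show pmin a 0 = pmin a (1 - 1) from rfl,
      fwd_spec a (a.length - 2) 1 (le_refl 1) (by omega)]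
    rw [hm0, show smin a a.length = smin a ((a.length - 2) + 1 + 1) from by
        rw [show (a.length - 2) + 1 + 1 = a.length from by omega]]
    have hbwd := bwd_spec a (a.length - 2) (by omega)
    rw [show (a.length - 2) + 1 + 1 = a.length from by omega] at *
    rw [show smin a ((a.length - 2) + 1) = smin a (a.length - 1) from by
      congr 1; omega] at hbwd
    rw [show smin a a.length = smin a (a.length - 1) from by
      rw [smin_top, smin_last a ha]]
    rw [hbwd]
    -- inclusion-exclusion + the overlap in closed form
    simp only []
    rw [← both_spec a h2]
    have hie : (List.range (a.length - 2)).countP (fun j => pb a (1 + j) || sb a (1 + j))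
        + (List.range (a.length - 2)).countP (fun j => pb a (1 + j) && sb a (1 + j))
        = (List.range (a.length - 2)).countP (fun j => pb a (1 + j))
        + (List.range (a.length - 2)).countP (fun j => sb a (1 + j)) :=
      countP_or_and _ _ _
    simp only [cntI]
    omega
  
-- ===== VERDICT (by name: the statement is the Claim_ definition above) =====
theorem solution_spec : Claim_equal_solution := by
  unfold Claim_equal_solution
  intro a _ ha
  unfold Spec_solution
  exact main_eq a ha
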